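-- pv_equiv track=rewrite | github.com/RaggedR/rsk-transformer | rsk.py | rsk_forward
-- ===== SOURCE A (Python) =====
-- import copy
--
-- Tableau = list[list[int]]
--
-- def schensted_insert(tableau: Tableau, value: int) -> tuple[Tableau, tuple[int, int]]:
--     """
--     Insert `value` into `tableau` using Schensted row insertion (bumping).
--
--     Returns the modified tableau and the (row, col) position where the new cell
--     was added — this is needed to build Q alongside P.
--
--     The algorithm: scan row 0 for the leftmost entry > value. If found, bump it
--     and recursively insert the bumped value into the next row. If no entry is
--     larger (value is larger than everything in the row), append to the end.
--     """
--     tableau = copy.deepcopy(tableau)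
--     row_idx = 0
--
--     while row_idx < len(tableau):
--         row = tableau[row_idx]
--         # Binary search for leftmost entry strictly greater than value
--         lo, hi = 0, len(row)
--         while lo < hi:
--             mid = (lo + hi) // 2
--             if row[mid] <= value:
--                 lo = mid + 1
--             else:
--                 hi = mid
--
--         if lo < len(row):
--             # Bump: replace row[lo] with value, continue inserting bumped value
--             bumped = row[lo]
--             row[lo] = value
--             value = bumped
--             row_idx += 1
--         else:
--             # No bumping needed: append to end of this row
--             row.append(value)
--             return tableau, (row_idx, len(row) - 1)
--
--     # Value was bumped out of all existing rows — start a new row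
--     tableau.append([value])
--     return tableau, (row_idx, 0)
--
-- def rsk_forward(sigma: list[int]) -> tuple[Tableau, Tableau]:
--     """
--     Compute the RSK correspondence: σ → (P, Q).
--
--     σ is a permutation given as a list [σ(1), σ(2), ..., σ(n)] using values 1..n.
--     Returns insertion tableau P and recording tableau Q.
--     """
--     P: Tableau = []
--     Q: Tableau = []
--
--     for i, val in enumerate(sigma, start=1):
--         P, (row, col) = schensted_insert(P, val)
--         # Record where the new cell appeared, labelled by position i
--         while len(Q) <= row:
--             Q.append([])
--         Q[row].append(i)
--
--     return P, Q
-- ===== SOURCE B (Python) =====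
-- Tableau = list[list[int]]
--
-- def rsk_forward(sigma: list[int]) -> tuple[Tableau, Tableau]:
--     """
--     RSK correspondence sigma -> (P, Q), mutating P and Q in place:
--     no deepcopy per insertion, and Q is grown in the same loop as P.
--     Each bump position is found by a linear scan of the (sorted) row.
--     """
--     P: Tableau = []
--     Q: Tableau = []
--     for i, v in enumerate(sigma, start=1):
--         r = 0
--         while r < len(P):
--             row = P[r]
--             j = 0
--             while j < len(row) and row[j] <= v:
--                 j += 1
--             if j == len(row):
--                 break
--             row[j], v = v, row[j]
--             r += 1
--         if r == len(P):
--             P.append([v])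
--             Q.append([i])
--         else:
--             P[r].append(v)
--             Q[r].append(i)
--     return P, Q
-- ===== Notes on version B (the rewrite author's own statement) =====
-- stated objective: faster
-- what changed: B mutates the tableaux in place (no O(size) deepcopy per insertion), builds Q in the same loop instead of pad-then-append, and finds each bump position by a linear scan of the sorted row instead of a hand-written binary search.
import Mathlib
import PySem

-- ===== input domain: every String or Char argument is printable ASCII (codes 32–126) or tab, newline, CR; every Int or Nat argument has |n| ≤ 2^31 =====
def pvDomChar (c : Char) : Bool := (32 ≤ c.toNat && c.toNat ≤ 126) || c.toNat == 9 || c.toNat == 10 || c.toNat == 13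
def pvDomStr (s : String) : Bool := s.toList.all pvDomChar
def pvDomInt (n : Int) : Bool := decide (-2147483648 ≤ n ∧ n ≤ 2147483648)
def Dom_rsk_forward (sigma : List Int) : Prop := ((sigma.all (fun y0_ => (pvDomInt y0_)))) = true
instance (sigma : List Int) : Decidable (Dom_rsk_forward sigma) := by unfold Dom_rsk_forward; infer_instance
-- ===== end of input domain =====

-- B mutates the tableaux in place (no deepcopy per insertion), grows Q in the same
-- loop as P, and finds each bump position by a linear scan instead of binary search.

-- ===== PORT A =====

-- A's inner `while lo < hi` binary search; row[mid] is in range (0 ≤ mid < hi ≤ len), so getD is exact.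
-- `fuel = hi - lo` only makes the loop structurally recursive (the gap shrinks each turn); it never changes the result.
def pvBsearchGo (row : List Int) (value : Int) : Nat → Nat → Nat → Nat
  | 0, lo, _ => lo
  | fuel + 1, lo, hi =>
    if lo < hi then
      let mid := (lo + hi) / 2
      if row.getD mid 0 ≤ value then pvBsearchGo row value fuel (mid + 1) hi
      else pvBsearchGo row value fuel lo mid
    else lo

def pvBsearchA (row : List Int) (value : Int) (lo hi : Nat) : Nat :=
  pvBsearchGo row value (hi - lo) lo hi

-- A's `while row_idx < len(tableau)` loop of schensted_insert (deepcopy is the identity on values);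
-- `fuel = len(tableau) - row_idx` makes it structural: fuel 0 means row_idx ≥ len, i.e. the loop's exit branch.
def pvInsertGo : Nat → List (List Int) → Int → Nat → List (List Int) × (Nat × Nat)
  | 0, tableau, value, row_idx => (tableau ++ [[value]], (row_idx, 0))
  | fuel + 1, tableau, value, row_idx =>
    if h : row_idx < tableau.length then
      let row := tableau[row_idx]
      let lo := pvBsearchA row value 0 row.length
      if lo < row.length then
        -- bump: row[lo] := value, continue with the bumped value in the next row
        pvInsertGo fuel (tableau.set row_idx (row.set lo value)) (row.getD lo 0) (row_idx + 1)
      else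
        (tableau.set row_idx (row ++ [value]), (row_idx, (row ++ [value]).length - 1))
    else
      (tableau ++ [[value]], (row_idx, 0))

def pvInsertA (tableau : List (List Int)) (value : Int) (row_idx : Nat) :
    List (List Int) × (Nat × Nat) :=
  pvInsertGo (tableau.length - row_idx) tableau value row_idx

-- A's `while len(Q) <= row: Q.append([])`; `fuel = row + 1 - len(Q)` makes it structural
-- (fuel 0 means len(Q) > row, i.e. the loop's exit condition)
def pvPadGo : Nat → List (List Int) → Nat → List (List Int)
  | 0, Q, _ => Q
  | fuel + 1, Q, row => if Q.length ≤ row then pvPadGo fuel (Q ++ [([] : List Int)]) row else Q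

def pvPadQ (Q : List (List Int)) (row : Nat) : List (List Int) :=
  pvPadGo (row + 1 - Q.length) Q row

-- A's `for i, val in enumerate(sigma, start=1)` loop
def pvLoopA (sigma : List Int) (i : Int) (P Q : List (List Int)) :
    List (List Int) × List (List Int) :=
  match sigma with
  | [] => (P, Q)
  | val :: rest =>
    let res := pvInsertA P val 0
    let Q1 := pvPadQ Q res.2.1
    pvLoopA rest (i + 1) res.1 (Q1.modify res.2.1 (fun r => r ++ [i]))

def rsk_forward (sigma : List Int) : List (List Int) × List (List Int) :=
  pvLoopA sigma 1 [] []

-- ===== PORT B =====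

-- B's inner `while j < len(row) and row[j] <= v: j += 1`
def pvScanB (row : List Int) (v : Int) : Nat :=
  match row with
  | [] => 0
  | x :: xs => if x ≤ v then pvScanB xs v + 1 else 0

-- B's `while r < len(P)` bump loop together with the final P[r]/Q[r] update;
-- B keeps len(P) = len(Q), so the `_ :: _, []` case is unreachable
def pvBumpB (P Q : List (List Int)) (v : Int) (i : Int) :
    List (List Int) × List (List Int) :=
  match P, Q with
  | [], _ => ([[v]], [[i]])
  | row :: Ps, qrow :: Qs =>
    let j := pvScanB row v
    if j = row.length then ((row ++ [v]) :: Ps, (qrow ++ [i]) :: Qs)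
    else
      let res := pvBumpB Ps Qs (row.getD j 0) i
      ((row.set j v) :: res.1, qrow :: res.2)
  | _ :: _, [] => (P, Q)

-- B's `for i, v in enumerate(sigma, start=1)` loop
def pvLoopB (sigma : List Int) (i : Int) (P Q : List (List Int)) :
    List (List Int) × List (List Int) :=
  match sigma with
  | [] => (P, Q)
  | v :: rest =>
    let res := pvBumpB P Q v i
    pvLoopB rest (i + 1) res.1 res.2

def rsk_forward_alt (sigma : List Int) : List (List Int) × List (List Int) :=
  pvLoopB sigma 1 [] []

-- ===== PRECONDITION & SPEC =====
def Spec_rsk_forward (sigma : List Int) (out : List (List Int) × List (List Int)) : Prop := out = rsk_forward_alt sigma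
instance (sigma : List Int) (out : List (List Int) × List (List Int)) : Decidable (Spec_rsk_forward sigma out) := by unfold Spec_rsk_forward; infer_instance

-- ===== CLAIM (what is proved, stated in full; the proofs are below) =====
def Claim_equal_rsk_forward : Prop := ∀ (sigma : List Int), Dom_rsk_forward sigma → Spec_rsk_forward sigma (rsk_forward sigma)

-- ===== LEMMAS AND PROOFS =====

-- unfold lemmas for the WF-recursive ports
theorem insertA_stop (T : List (List Int)) (v : Int) (idx : Nat) (h : ¬ idx < T.length) :
    pvInsertA T v idx = (T ++ [[v]], (idx, 0)) := by
  unfold pvInsertA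
  rw [show T.length - idx = 0 from by omega]
  rfl

theorem insertA_append (T : List (List Int)) (v : Int) (idx : Nat) (h : idx < T.length)
    (h2 : ¬ pvBsearchA (T[idx]'h) v 0 (T[idx]'h).length < (T[idx]'h).length) :
    pvInsertA T v idx = (T.set idx ((T[idx]'h) ++ [v]), (idx, ((T[idx]'h) ++ [v]).length - 1)) := by
  unfold pvInsertA
  rw [show T.length - idx = (T.length - (idx + 1)) + 1 from by omega]
  rw [pvInsertGo, dif_pos h]; dsimp only; rw [if_neg h2]

theorem insertA_bump (T : List (List Int)) (v : Int) (idx : Nat) (h : idx < T.length)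
    (h2 : pvBsearchA (T[idx]'h) v 0 (T[idx]'h).length < (T[idx]'h).length) :
    pvInsertA T v idx =
      pvInsertA (T.set idx ((T[idx]'h).set (pvBsearchA (T[idx]'h) v 0 (T[idx]'h).length) v))
        ((T[idx]'h).getD (pvBsearchA (T[idx]'h) v 0 (T[idx]'h).length) 0) (idx + 1) := by
  conv_rhs => unfold pvInsertA
  rw [List.length_set]
  conv_lhs => unfold pvInsertA
  rw [show T.length - idx = (T.length - (idx + 1)) + 1 from by omega]
  rw [pvInsertGo, dif_pos h]; dsimp only; rw [if_pos h2]

theorem padQ_grow (Q : List (List Int)) (r : Nat) (h : Q.length ≤ r) :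
    pvPadQ Q r = pvPadQ (Q ++ [([] : List Int)]) r := by
  unfold pvPadQ
  rw [show r + 1 - Q.length = (r + 1 - (Q ++ [([] : List Int)]).length) + 1 from by
        simp only [List.length_append, List.length_cons, List.length_nil]; omega]
  rw [pvPadGo, if_pos h]

theorem padQ_stop (Q : List (List Int)) (r : Nat) (h : ¬ Q.length ≤ r) :
    pvPadQ Q r = Q := by
  unfold pvPadQ
  rw [show r + 1 - Q.length = 0 from by omega]
  rfl

-- pvScanB returns at most the row length
theorem pvScanB_le (row : List Int) (v : Int) : pvScanB row v ≤ row.length := by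
  induction row with
  | nil => simp [pvScanB]
  | cons x xs ih => simp only [pvScanB, List.length_cons]; split <;> omega

-- everything strictly before the scan position is ≤ v
theorem pvScanB_prefix (row : List Int) (v : Int) :
    ∀ k, (hk : k < row.length) → k < pvScanB row v → row[k] ≤ v := by
  induction row with
  | nil => intro k hk; simp at hk
  | cons x xs ih =>
    intro k hk hlt
    simp only [pvScanB] at hlt
    by_cases hx : x ≤ v
    · simp only [if_pos hx] at hlt
      cases k with
      | zero => simpa using hx
      | succ k => exact ih k (by simpa using Nat.lt_of_succ_lt_succ hk) (by omega)
    · simp [if_neg hx] at hlt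

-- the element at the scan position (if any) is > v
theorem pvScanB_stop (row : List Int) (v : Int) (h : pvScanB row v < row.length) :
    v < row[pvScanB row v] := by
  induction row with
  | nil => simp at h
  | cons x xs ih =>
    simp only [pvScanB] at h ⊢
    by_cases hx : x ≤ v
    · simp only [if_pos hx] at h ⊢
      exact ih (by simpa using Nat.lt_of_succ_lt_succ h)
    · simp only [if_neg hx, List.getElem_cons_zero]
      omega

-- an index with everything before it ≤ v and everything from it on > v is the scan position
theorem scan_unique (row : List Int) (v : Int) (lo : Nat) (hlo : lo ≤ row.length)
    (hpre : ∀ k, (hk : k < row.length) → k < lo → row[k] ≤ v)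
    (hpost : ∀ k, (hk : k < row.length) → lo ≤ k → v < row[k]) :
    lo = pvScanB row v := by
  rcases Nat.lt_trichotomy lo (pvScanB row v) with hc | hc | hc
  · have hlt : lo < row.length := by
      have := pvScanB_le row v; omega
    have := pvScanB_prefix row v lo hlt hc
    have := hpost lo hlt (le_refl _)
    omega
  · exact hc
  · have hlt : pvScanB row v < row.length := by omega
    have := pvScanB_stop row v hlt
    have := hpre (pvScanB row v) hlt hc
    omega

-- on a sorted row, A's binary search lands where B's linear scan lands
theorem pvBsearchGo_eq_scan (row : List Int) (v : Int)
    (hs : List.Pairwise (· ≤ ·) row) :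
    ∀ (fuel : Nat) (lo hi : Nat), hi - lo ≤ fuel → lo ≤ hi → hi ≤ row.length →
      (∀ k, (hk : k < row.length) → k < lo → row[k] ≤ v) →
      (∀ k, (hk : k < row.length) → hi ≤ k → v < row[k]) →
      pvBsearchGo row v fuel lo hi = pvScanB row v := by
  intro fuel
  induction fuel with
  | zero =>
    intro lo hi hfuel hlh hhl hpre hpost
    have heq : lo = hi := by omega
    subst heq
    exact scan_unique row v lo hhl hpre hpost
  | succ fuel ih =>
    intro lo hi hfuel hlh hhl hpre hpost
    rw [pvBsearchGo]
    by_cases hc : lo < hi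
    · rw [if_pos hc]
      dsimp only
      by_cases hle : row.getD ((lo + hi) / 2) 0 ≤ v
      · rw [if_pos hle]
        refine ih ((lo + hi) / 2 + 1) hi (by omega) (by omega) hhl ?_ hpost
        intro k hk hklt
        rcases Nat.lt_or_ge k lo with hcase | hcase
        · exact hpre k hk hcase
        · have hmid : (lo + hi) / 2 < row.length := by omega
          have h1 : row[k] ≤ row[(lo + hi) / 2] := by
            rcases Nat.lt_or_ge k ((lo + hi) / 2) with hk2 | hk2
            · exact (List.pairwise_iff_getElem.mp hs) k _ hk hmid hk2
            · have : k = (lo + hi) / 2 := by omega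
              subst this; exact le_refl _
          have h2 : row[(lo + hi) / 2] ≤ v := by
            simpa [List.getD_eq_getElem?_getD, List.getElem?_eq_getElem hmid] using hle
          exact le_trans h1 h2
      · rw [if_neg hle]
        refine ih lo ((lo + hi) / 2) (by omega) (by omega) (by omega) hpre ?_
        intro k hk hkge
        have hmid : (lo + hi) / 2 < row.length := by omega
        have h1 : v < row[(lo + hi) / 2] := by
          have := hle
          simp only [List.getD_eq_getElem?_getD, List.getElem?_eq_getElem hmid] at this
          simpa using lt_of_not_ge this
        have h2 : row[(lo + hi) / 2] ≤ row[k] := by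
          rcases Nat.lt_or_ge ((lo + hi) / 2) k with hk2 | hk2
          · exact (List.pairwise_iff_getElem.mp hs) _ k hmid hk hk2
          · have : (lo + hi) / 2 = k := by omega
            subst this; exact le_refl _
        exact lt_of_lt_of_le h1 h2
    · rw [if_neg hc]
      have heq : lo = hi := by omega
      subst heq
      exact scan_unique row v lo hhl hpre hpost

theorem pvBsearchA_eq_scan (row : List Int) (v : Int)
    (hs : List.Pairwise (· ≤ ·) row) :
    ∀ lo hi, lo ≤ hi → hi ≤ row.length →
      (∀ k, (hk : k < row.length) → k < lo → row[k] ≤ v) →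
      (∀ k, (hk : k < row.length) → hi ≤ k → v < row[k]) →
      pvBsearchA row v lo hi = pvScanB row v := by
  intro lo hi h1 h2 h3 h4
  exact pvBsearchGo_eq_scan row v hs (hi - lo) lo hi (le_refl _) h1 h2 h3 h4

-- setting the bump position keeps the row sorted
theorem sorted_set (row : List Int) (v : Int) (j : Nat)
    (hs : List.Pairwise (· ≤ ·) row) (hj : j < row.length)
    (hpre : ∀ k, (hk : k < row.length) → k < j → row[k] ≤ v)
    (hstop : v < row[j]) :
    List.Pairwise (· ≤ ·) (row.set j v) := by
  rw [List.pairwise_iff_getElem] at hs ⊢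
  intro a b ha hb hab
  simp only [List.length_set] at ha hb
  rw [List.getElem_set, List.getElem_set]
  split_ifs with h1 h2 h2
  · omega
  · subst h1
    exact le_of_lt (lt_of_lt_of_le hstop (hs j b hj hb hab))
  · subst h2
    exact hpre a ha hab
  · exact hs a b ha hb hab

-- appending a maximal value keeps the row sorted
theorem sorted_append (row : List Int) (v : Int)
    (hs : List.Pairwise (· ≤ ·) row)
    (hpre : ∀ k, (hk : k < row.length) → row[k] ≤ v) :
    List.Pairwise (· ≤ ·) (row ++ [v]) := by
  rw [List.pairwise_append]
  refine ⟨hs, by simp, ?_⟩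
  intro a ha b hb
  simp only [List.mem_singleton] at hb
  subst hb
  obtain ⟨k, hk, rfl⟩ := List.mem_iff_getElem.mp ha
  exact hpre k hk

-- pvBumpB keeps every row of P sorted
theorem pvBumpB_sorted (P : List (List Int)) :
    ∀ Q v i, (∀ r ∈ P, List.Pairwise (· ≤ ·) r) →
      ∀ r ∈ (pvBumpB P Q v i).1, List.Pairwise (· ≤ ·) r := by
  induction P with
  | nil =>
    intro Q v i _ r hr
    cases Q <;> simp [pvBumpB] at hr <;> simp [hr]
  | cons row Ps ih =>
    intro Q v i hs r hr
    cases Q with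
    | nil => simp only [pvBumpB] at hr; exact hs r hr
    | cons qrow Qs =>
      simp only [pvBumpB] at hr
      split at hr
      · next hj =>
        simp only [List.mem_cons] at hr
        rcases hr with rfl | hr
        · exact sorted_append row v (hs row (by simp)) (fun k hk => pvScanB_prefix row v k hk (by omega))
        · exact hs r (by simp [hr])
      · next hj =>
        simp only [List.mem_cons] at hr
        have hjlt : pvScanB row v < row.length := lt_of_le_of_ne (pvScanB_le row v) hj
        rcases hr with rfl | hr
        · have hst := pvScanB_stop row v hjlt
          exact sorted_set row v _ (hs row (by simp)) hjlt (fun k hk => pvScanB_prefix row v k hk) hst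
        · exact ih Qs (row.getD (pvScanB row v) 0) i (fun r hr => hs r (by simp [hr])) r hr

-- pvBumpB keeps |P| = |Q|
theorem pvBumpB_len (P : List (List Int)) :
    ∀ Q v i, Q.length = P.length →
      (pvBumpB P Q v i).2.length = (pvBumpB P Q v i).1.length := by
  induction P with
  | nil =>
    intro Q v i hlen
    have : Q = [] := List.eq_nil_of_length_eq_zero (by simpa using hlen)
    subst this; simp [pvBumpB]
  | cons row Ps ih =>
    intro Q v i hlen
    cases Q with
    | nil => simp at hlen
    | cons qrow Qs =>
      simp only [pvBumpB]
      split
      · simpa using hlen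
      · simp only [List.length_cons]
        exact congrArg Nat.succ (ih Qs _ i (by simpa using hlen))

-- shifting the starting row index past a fixed head row
theorem pvInsertA_shift (r0 : List Int) :
    ∀ (n : Nat) (T : List (List Int)) (v : Int) (idx : Nat), T.length ≤ idx + n →
      pvInsertA (r0 :: T) v (idx + 1) =
        (r0 :: (pvInsertA T v idx).1, ((pvInsertA T v idx).2.1 + 1, (pvInsertA T v idx).2.2)) := by
  intro n
  induction n with
  | zero =>
    intro T v idx hn
    have h : ¬ idx < T.length := by omega
    rw [insertA_stop _ _ _ h, insertA_stop _ _ _ (by simp; omega)]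
    simp
  | succ n ihn =>
    intro T v idx hn
    by_cases h : idx < T.length
    · have h1 : idx + 1 < (r0 :: T).length := by simp; omega
      have e1 : (r0 :: T)[idx+1]'h1 = T[idx]'h := by simp
      by_cases h2 : pvBsearchA (T[idx]'h) v 0 (T[idx]'h).length < (T[idx]'h).length
      · rw [insertA_bump T v idx h h2,
            insertA_bump (r0 :: T) v (idx+1) h1 (by simpa [e1] using h2)]
        simp only [List.set_cons_succ, List.getElem_cons_succ]
        exact ihn _ _ (idx+1) (by simp [List.length_set]; omega)
      · rw [insertA_append T v idx h h2,
            insertA_append (r0 :: T) v (idx+1) h1 (by simpa [e1] using h2)]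
        simp
    · rw [insertA_stop T v idx h, insertA_stop (r0 :: T) v (idx+1) (by simp; omega)]
      simp

-- padding a nonempty Q for a shifted row index
theorem pvPadQ_consAux (q : List Int) (r : Nat) :
    ∀ (n : Nat) (Q : List (List Int)), r + 1 - Q.length ≤ n →
      pvPadQ (q :: Q) (r + 1) = q :: pvPadQ Q r := by
  intro n
  induction n with
  | zero =>
    intro Q hn
    rw [padQ_stop _ _ (by simp; omega), padQ_stop _ _ (by omega)]
  | succ n ihn =>
    intro Q hn
    by_cases h : Q.length ≤ r
    · rw [padQ_grow Q r h, padQ_grow (q :: Q) (r + 1) (by simpa using h)]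
      rw [show (q :: Q) ++ [([] : List Int)] = q :: (Q ++ [([] : List Int)]) from rfl]
      exact ihn (Q ++ [([] : List Int)]) (by simp; omega)
    · rw [padQ_stop _ _ (by simpa using h), padQ_stop _ _ h]

theorem pvPadQ_cons (q : List Int) (r : Nat) :
    ∀ Q, pvPadQ (q :: Q) (r + 1) = q :: pvPadQ Q r := by
  intro Q
  exact pvPadQ_consAux q r (r + 1) Q (by omega)

-- one step of A (insert + pad + record) equals one step of B (single in-place pass)
theorem stepEq (P : List (List Int)) :
    ∀ Q v i, (∀ r ∈ P, List.Pairwise (· ≤ ·) r) → Q.length = P.length →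
      pvBumpB P Q v i =
        ((pvInsertA P v 0).1,
         (pvPadQ Q (pvInsertA P v 0).2.1).modify (pvInsertA P v 0).2.1 (fun r => r ++ [i])) := by
  induction P with
  | nil =>
    intro Q v i _ hlen
    have hQ : Q = [] := List.eq_nil_of_length_eq_zero (by simpa using hlen)
    subst hQ
    rw [insertA_stop ([] : List (List Int)) v 0 (by simp)]
    dsimp only
    rw [padQ_grow _ _ (by simp), padQ_stop _ _ (by simp)]
    simp [pvBumpB, List.modify_zero_cons]
  | cons row Ps ih =>
    intro Q v i hs hlen
    cases Q with
    | nil => simp at hlen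
    | cons qrow Qs =>
      have hsort : List.Pairwise (· ≤ ·) row := hs row (by simp)
      have hb : pvBsearchA row v 0 row.length = pvScanB row v :=
        pvBsearchA_eq_scan row v hsort 0 row.length (Nat.zero_le _) (le_refl _)
          (by intro k hk hk0; omega) (by intro k hk hk0; omega)
      have h0 : (0 : Nat) < (row :: Ps).length := by simp
      by_cases hj : pvScanB row v = row.length
      · have h2 : ¬ pvBsearchA ((row :: Ps)[0]'h0) v 0 ((row :: Ps)[0]'h0).length
            < ((row :: Ps)[0]'h0).length := by
          simp only [List.getElem_cons_zero, hb]; omega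
        rw [insertA_append _ v 0 h0 h2]
        dsimp only
        simp only [List.getElem_cons_zero, List.set_cons_zero]
        rw [padQ_stop _ _ (by simp)]
        simp [pvBumpB, hj, List.modify_zero_cons]
      · have hjlt : pvScanB row v < row.length := lt_of_le_of_ne (pvScanB_le row v) hj
        have h2 : pvBsearchA ((row :: Ps)[0]'h0) v 0 ((row :: Ps)[0]'h0).length
            < ((row :: Ps)[0]'h0).length := by
          simp only [List.getElem_cons_zero, hb]; omega
        rw [insertA_bump _ v 0 h0 h2]
        simp only [List.getElem_cons_zero, List.set_cons_zero, hb]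
        rw [pvInsertA_shift (row.set (pvScanB row v) v) Ps.length Ps (row.getD (pvScanB row v) 0) 0 (by omega)]
        dsimp only
        rw [pvPadQ_cons]
        simp only [pvBumpB, if_neg hj, List.modify_succ_cons]
        rw [ih Qs (row.getD (pvScanB row v) 0) i (fun r hr => hs r (by simp [hr])) (by simpa using hlen)]

-- the two main loops agree whenever rows of P are sorted and |P| = |Q|
theorem loopsEq (sigma : List Int) :
    ∀ i P Q, (∀ r ∈ P, List.Pairwise (· ≤ ·) r) → Q.length = P.length →
      pvLoopA sigma i P Q = pvLoopB sigma i P Q := by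
  induction sigma with
  | nil => intro i P Q _ _; rfl
  | cons v rest ih =>
    intro i P Q hs hlen
    simp only [pvLoopA, pvLoopB]
    have h := stepEq P Q v i hs hlen
    have h1 : (pvBumpB P Q v i).1 = (pvInsertA P v 0).1 := by rw [h]
    have h2 : (pvBumpB P Q v i).2
        = (pvPadQ Q (pvInsertA P v 0).2.1).modify (pvInsertA P v 0).2.1 (fun r => r ++ [i]) := by
      rw [h]
    rw [← h1, ← h2]
    exact ih (i + 1) (pvBumpB P Q v i).1 (pvBumpB P Q v i).2
      (pvBumpB_sorted P Q v i hs) (pvBumpB_len P Q v i hlen)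

-- ===== VERDICT (by name: the statement is the Claim_ definition above) =====
theorem rsk_forward_spec : Claim_equal_rsk_forward := by
  intro sigma _
  unfold Spec_rsk_forward rsk_forward rsk_forward_alt
  exact loopsEq sigma 1 [] [] (by simp) rfl
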